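-- pv_equiv track=rewrite | github.com/bildzeitung/adventofcode | 2022/08/1.py | visibleRightwards
-- ===== SOURCE A (Python) =====
-- def visibleRightwards(l) -> int:
--     m = -1
--     v = set()
--     for x, i in enumerate(l):
--         if i > m:
--             m = i
--             v.add(x)
--     return v
-- ===== SOURCE B (Python) =====
-- def visibleRightwards(l) -> int:
--     v = set()
--     for x in range(len(l)):
--         if l[x] > max([-1] + l[:x]):
--             v.add(x)
--     return v
-- ===== Notes on version B (the rewrite author's own statement) =====
-- stated objective: alternative
-- what changed: B drops A's threaded running-maximum state and instead, for each index, recomputes the maximum of the sentinel-seeded prefix with a slice and one max() call (nested rescans instead of a single stateful pass).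
import Mathlib
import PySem

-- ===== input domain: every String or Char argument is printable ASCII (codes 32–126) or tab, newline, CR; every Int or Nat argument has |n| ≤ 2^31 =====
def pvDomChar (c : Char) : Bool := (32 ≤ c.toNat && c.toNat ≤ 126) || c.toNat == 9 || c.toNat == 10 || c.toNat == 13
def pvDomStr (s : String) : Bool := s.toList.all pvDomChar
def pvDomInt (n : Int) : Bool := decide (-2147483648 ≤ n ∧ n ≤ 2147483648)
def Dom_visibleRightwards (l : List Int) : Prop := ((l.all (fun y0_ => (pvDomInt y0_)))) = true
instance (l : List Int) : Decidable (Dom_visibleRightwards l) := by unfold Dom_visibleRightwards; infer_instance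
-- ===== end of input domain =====

-- B replaces A's threaded running maximum with a per-index recomputation of the
-- prefix maximum (alternative decomposition, not faster).

-- ===== PORT A =====
-- running state (m, v); for x, i in enumerate(l): if i > m: m = i; v.add(x)
def visibleRightwards (l : List Int) : List Int :=
  ((PySem.List.enumerate l 0).foldl
    (fun (st : Int × PySem.Set Int) xi =>
      if xi.2 > st.1 then (xi.2, PySem.Set.add st.2 xi.1) else st)
    (-1, PySem.Set.empty)).2

-- ===== PORT B =====
-- for x in range(len(l)): if l[x] > max([-1] + l[:x]): v.add(x)
-- max([-1] + pref) is ported as pref.foldl max (-1) (PySem.List.max?_id_cons: max of a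
-- nonempty list IS this fold); l[x] is in range for x in range(len(l)), so pyGetD is exact.
def visibleRightwards_alt (l : List Int) : List Int :=
  (PySem.List.pyRange 0 l.length 1).foldl
    (fun (v : PySem.Set Int) x =>
      if PySem.List.pyGetD l x 0 > (PySem.List.slice l none (some x)).foldl max (-1)
      then PySem.Set.add v x else v)
    PySem.Set.empty

-- ===== PRECONDITION & SPEC =====
def Spec_visibleRightwards (l : List Int) (out : List Int) : Prop := out = visibleRightwards_alt l
instance (l : List Int) (out : List Int) : Decidable (Spec_visibleRightwards l out) := by unfold Spec_visibleRightwards; infer_instance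

-- ===== CLAIM (what is proved, stated in full; the proofs are below) =====
def Claim_equal_visibleRightwards : Prop := ∀ (l : List Int), Dom_visibleRightwards l → Spec_visibleRightwards l (visibleRightwards l)

-- ===== LEMMAS AND PROOFS =====

lemma alt_append (l : List Int) (a : Int) :
    visibleRightwards_alt (l ++ [a]) =
      (if a > l.foldl max (-1) then PySem.Set.add (visibleRightwards_alt l) (l.length : Int)
       else visibleRightwards_alt l) := by
  unfold visibleRightwards_alt
  have hlen : ((l ++ [a]).length : Int) = (l.length : Int) + 1 := by
    simp [List.length_append]
  rw [hlen, PySem.List.pyRange_one_succ_right (by positivity)]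
  rw [List.foldl_append]
  have hcongr :
      (PySem.List.pyRange 0 (l.length : Int) 1).foldl
        (fun (v : PySem.Set Int) x =>
          if PySem.List.pyGetD (l ++ [a]) x 0 > (PySem.List.slice (l ++ [a]) none (some x)).foldl max (-1)
          then PySem.Set.add v x else v) PySem.Set.empty
      = (PySem.List.pyRange 0 (l.length : Int) 1).foldl
        (fun (v : PySem.Set Int) x =>
          if PySem.List.pyGetD l x 0 > (PySem.List.slice l none (some x)).foldl max (-1)
          then PySem.Set.add v x else v) PySem.Set.empty := by
    apply PySem.List.foldl_congr_mem
    intro acc x hx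
    rw [PySem.List.mem_pyRange_one] at hx
    have hget : PySem.List.pyGetD (l ++ [a]) x 0 = PySem.List.pyGetD l x 0 := by
      rw [PySem.List.pyGetD_eq_getElem _ 0 hx.1 (by rw [List.length_append]; push_cast; omega),
          PySem.List.pyGetD_eq_getElem _ 0 hx.1 (by omega)]
      rw [List.getElem_append_left]
    have hslice : PySem.List.slice (l ++ [a]) none (some x) = PySem.List.slice l none (some x) := by
      rw [PySem.List.slice_to _ hx.1, PySem.List.slice_to _ hx.1]
      rw [List.take_append_of_le_length (by omega)]
    rw [hget, hslice]
  rw [hcongr]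
  simp only [List.foldl_cons, List.foldl_nil]
  have hga : PySem.List.pyGetD (l ++ [a]) (l.length : Int) 0 = a := by
    rw [PySem.List.pyGetD_eq_getElem _ 0 (by positivity) (by rw [List.length_append]; push_cast; simp)]
    simp
  have hsa : PySem.List.slice (l ++ [a]) none (some (l.length : Int)) = l := by
    rw [PySem.List.slice_to _ (by positivity)]
    simp
  rw [hga, hsa]

-- A's fold computes the running maximum max(-1, prefix) together with B's set.
lemma fold_inv (l : List Int) :
    (PySem.List.enumerate l 0).foldl
      (fun (st : Int × PySem.Set Int) xi =>
        if xi.2 > st.1 then (xi.2, PySem.Set.add st.2 xi.1) else st)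
      (-1, PySem.Set.empty)
    = (l.foldl max (-1), visibleRightwards_alt l) := by
  induction l using List.reverseRecOn with
  | nil => simp [visibleRightwards_alt, PySem.List.enumerate, PySem.List.pyRange_one_eq_nil]
  | append_singleton l a ih =>
    rw [PySem.List.enumerate_append, List.foldl_append, ih]
    simp only [PySem.List.enumerate, List.foldl_cons, List.foldl_nil]
    rw [alt_append, List.foldl_append]
    simp only [List.foldl_cons, List.foldl_nil]
    by_cases h : a > l.foldl max (-1)
    · simp [h, max_eq_right (le_of_lt h)]
    · simp [h, max_eq_left (not_lt.mp h)]

-- ===== VERDICT (by name: the statement is the Claim_ definition above) =====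
theorem visibleRightwards_spec : Claim_equal_visibleRightwards := by
  intro l _
  unfold Spec_visibleRightwards visibleRightwards
  rw [fold_inv]
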